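-- pv_equiv track=rewrite | github.com/yeonwoo1125/cospro-python-study | yeonwoo/answer/단체_유니폼_맞추기.py | solution
-- ===== SOURCE A (Python) =====
-- def solution(people):
-- 	answer = [0 for _ in range(4)]
-- 	for height in people:
-- 		if height < 95:
-- 			answer[0] += 1
-- 		elif height < 100:
-- 			answer[1] += 1
-- 		elif height < 105:
-- 			answer[2] += 1
-- 		else:
-- 			answer[3] += 1
-- 	return answer
-- ===== SOURCE B (Python) =====
-- def solution(people):
--     return [sum(1 for h in people if h < 95),
--             sum(1 for h in people if 95 <= h < 100),
--             sum(1 for h in people if 100 <= h < 105),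
--             sum(1 for h in people if 105 <= h)]
-- ===== Notes on version B (the rewrite author's own statement) =====
-- stated objective: idiomatic
-- what changed: Replaces the single loop that mutates a 4-slot list through an if/elif cascade with four independent counting comprehensions, one per disjoint height range.
import Mathlib
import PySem

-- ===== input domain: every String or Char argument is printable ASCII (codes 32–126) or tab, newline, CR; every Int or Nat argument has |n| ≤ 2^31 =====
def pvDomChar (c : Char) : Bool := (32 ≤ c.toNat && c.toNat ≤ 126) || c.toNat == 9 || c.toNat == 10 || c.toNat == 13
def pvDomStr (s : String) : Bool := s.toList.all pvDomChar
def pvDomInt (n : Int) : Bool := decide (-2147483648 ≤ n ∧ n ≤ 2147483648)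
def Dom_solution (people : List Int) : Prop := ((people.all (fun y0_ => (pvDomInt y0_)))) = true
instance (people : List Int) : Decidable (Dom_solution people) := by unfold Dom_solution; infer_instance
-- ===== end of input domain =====

-- B replaces A's single mutating loop with an if/elif cascade by four independent range counts (idiomatic, same cost).

-- ===== PORT A =====
-- literal port of A: fold over people, mutating a 4-element accumulator list in place
def solution (people : List Int) : List Int :=
  people.foldl (fun answer height =>
    if height < 95 then answer.set 0 (answer.getD 0 0 + 1)
    else if height < 100 then answer.set 1 (answer.getD 1 0 + 1)
    else if height < 105 then answer.set 2 (answer.getD 2 0 + 1)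
    else answer.set 3 (answer.getD 3 0 + 1)) [0, 0, 0, 0]

-- ===== PORT B =====
-- port of Source B: one count per disjoint height range
def solution_alt (people : List Int) : List Int :=
  [(people.countP (fun h => h < 95) : Int),
   (people.countP (fun h => 95 ≤ h ∧ h < 100) : Int),
   (people.countP (fun h => 100 ≤ h ∧ h < 105) : Int),
   (people.countP (fun h => 105 ≤ h) : Int)]

-- ===== PRECONDITION & SPEC =====
def Spec_solution (people : List Int) (out : List Int) : Prop := out = solution_alt people
instance (people : List Int) (out : List Int) : Decidable (Spec_solution people out) := by unfold Spec_solution; infer_instance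

-- ===== CLAIM (what is proved, stated in full; the proofs are below) =====
def Claim_equal_solution : Prop := ∀ (people : List Int), Dom_solution people → Spec_solution people (solution people)

-- ===== LEMMAS AND PROOFS =====
-- loop invariant: A's fold from any 4-element accumulator adds the four range counts
theorem solution_fold_inv (people : List Int) : ∀ (a b c d : Int),
    people.foldl (fun answer height =>
      if height < 95 then answer.set 0 (answer.getD 0 0 + 1)
      else if height < 100 then answer.set 1 (answer.getD 1 0 + 1)
      else if height < 105 then answer.set 2 (answer.getD 2 0 + 1)
      else answer.set 3 (answer.getD 3 0 + 1)) [a, b, c, d]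
    = [a + (people.countP (fun h => h < 95) : Int),
       b + (people.countP (fun h => 95 ≤ h ∧ h < 100) : Int),
       c + (people.countP (fun h => 100 ≤ h ∧ h < 105) : Int),
       d + (people.countP (fun h => 105 ≤ h) : Int)] := by
  induction people with
  | nil => simp
  | cons h t ih =>
    intro a b c d
    simp only [List.foldl_cons, List.countP_cons]
    by_cases h1 : h < 95
    · simp only [if_pos h1]
      rw [show (([a, b, c, d].set 0 (([a, b, c, d].getD 0 0) + 1)) : List Int) = [a + 1, b, c, d] from rfl, ih]
      simp [h1]; omega
    · by_cases h2 : h < 100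
      · simp only [if_neg h1, if_pos h2]
        rw [show (([a, b, c, d].set 1 (([a, b, c, d].getD 1 0) + 1)) : List Int) = [a, b + 1, c, d] from rfl, ih]
        simp [h1, h2]; omega
      · by_cases h3 : h < 105
        · simp only [if_neg h1, if_neg h2, if_pos h3]
          rw [show (([a, b, c, d].set 2 (([a, b, c, d].getD 2 0) + 1)) : List Int) = [a, b, c + 1, d] from rfl, ih]
          simp [h1, h2, h3]; omega
        · simp only [if_neg h1, if_neg h2, if_neg h3]
          rw [show (([a, b, c, d].set 3 (([a, b, c, d].getD 3 0) + 1)) : List Int) = [a, b, c, d + 1] from rfl, ih]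
          simp [h1, h2, h3]; omega

-- ===== VERDICT (by name: the statement is the Claim_ definition above) =====
theorem solution_spec : Claim_equal_solution := by
  intro people _
  unfold Spec_solution solution solution_alt
  rw [solution_fold_inv]
  simp
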